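-- pv_equiv track=rewrite | github.com/haolunc/ARC-RL | reference_solutions/solutions/396d80d7.py | transform
-- ===== SOURCE A (Python) =====
-- def transform(grid):
--
--     h = len(grid)
--     w = len(grid[0]) if h else 0
--
--     from collections import Counter
--     cnt = Counter()
--     for row in grid:
--         cnt.update(row)
--     background = max(cnt.items(), key=lambda kv: kv[1])[0]
--
--     other = [c for c in cnt if c != background]
--     if len(other) != 2:
--         return [row[:] for row in grid]
--
--     if cnt[other[0]] < cnt[other[1]]:
--         inner, outer = other[0], other[1]
--     else:
--         inner, outer = other[1], other[0]
--
--     outer_mask = [[cell == outer for cell in row] for row in grid]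
--
--     out = [row[:] for row in grid]
--
--     diag_off = [(-1, -1), (-1, 1), (1, -1), (1, 1)]
--     ortho_off = [(-1, 0), (1, 0), (0, -1), (0, 1)]
--
--     def inside(r, c):
--         return 0 <= r < h and 0 <= c < w
--
--     for i in range(h):
--         for j in range(w):
--             if grid[i][j] != background:
--                 continue
--
--             diagonal = False
--             for dr, dc in diag_off:
--                 nr, nc = i + dr, j + dc
--                 if inside(nr, nc) and outer_mask[nr][nc]:
--                     diagonal = True
--                     break
--
--             if not diagonal:
--                 continue
--
--             orthogonal = False
--             for dr, dc in ortho_off: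
--                 nr, nc = i + dr, j + dc
--                 if inside(nr, nc) and outer_mask[nr][nc]:
--                     orthogonal = True
--                     break
--
--             if not orthogonal:
--                 out[i][j] = inner
--
--     return out
-- ===== SOURCE B (Python) =====
-- def transform(grid):
--     h = len(grid)
--     w = len(grid[0]) if h else 0
--
--     from collections import Counter
--     cnt = Counter(c for row in grid for c in row)
--     background = max(cnt.items(), key=lambda kv: kv[1])[0]
--
--     other = [c for c in cnt if c != background]
--     if len(other) != 2:
--         return [row[:] for row in grid]
--
--     if cnt[other[0]] < cnt[other[1]]:
--         inner, outer = other
--     else: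
--         outer, inner = other
--
--     # push style: every outer cell marks its background neighbours
--     diag_adj = set()
--     ortho_adj = set()
--     for i in range(h):
--         for j in range(w):
--             if grid[i][j] != outer:
--                 continue
--             for dr in (-1, 1):
--                 for dc in (-1, 1):
--                     r, c = i + dr, j + dc
--                     if 0 <= r < h and 0 <= c < w and grid[r][c] == background:
--                         diag_adj.add((r, c))
--             for r, c in ((i - 1, j), (i + 1, j), (i, j - 1), (i, j + 1)):
--                 if 0 <= r < h and 0 <= c < w and grid[r][c] == background:
--                     ortho_adj.add((r, c))
--
--     out = [row[:] for row in grid]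
--     for r, c in diag_adj - ortho_adj:
--         out[r][c] = inner
--     return out
-- ===== Notes on version B (the rewrite author's own statement) =====
-- stated objective: alternative
-- what changed: The per-cell pull probe (for every background cell, scan diagonal then orthogonal offsets with early break) is replaced by a push pass: iterate over the outer-colored cells, collecting their background diagonal neighbours and orthogonal neighbours into two sets, then recolor the set difference in one final pass.
import Mathlib
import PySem

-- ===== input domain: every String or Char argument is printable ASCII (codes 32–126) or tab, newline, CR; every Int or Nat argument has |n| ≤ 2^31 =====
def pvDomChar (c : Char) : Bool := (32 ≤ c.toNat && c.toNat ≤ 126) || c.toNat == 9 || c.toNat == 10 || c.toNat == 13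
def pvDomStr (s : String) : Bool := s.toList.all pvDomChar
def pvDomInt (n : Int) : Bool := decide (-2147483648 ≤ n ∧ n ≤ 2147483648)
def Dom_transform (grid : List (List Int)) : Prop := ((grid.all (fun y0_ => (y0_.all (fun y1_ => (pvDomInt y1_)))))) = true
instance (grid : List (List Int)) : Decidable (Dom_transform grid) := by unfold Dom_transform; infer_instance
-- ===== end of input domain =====

-- B replaces A's per-cell pull probe (scan diagonal then orthogonal offsets around every
-- background cell) by a push pass over the outer-colored cells that collects two neighbour
-- sets and recolors their set difference (objective: alternative decomposition).

-- ===== PORT A =====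
def pvInside (h w r c : Int) : Bool := decide (0 ≤ r ∧ r < h) && decide (0 ≤ c ∧ c < w)

def pvDiagOff : List (Int × Int) := [(-1, -1), (-1, 1), (1, -1), (1, 1)]
def pvOrthoOff : List (Int × Int) := [(-1, 0), (1, 0), (0, -1), (0, 1)]

def transform (grid : List (List Int)) : List (List Int) :=
  let h : Int := grid.length
  let w : Int := if h ≠ 0 then ((grid.headD []).length : Int) else 0
  let cnt : PySem.Dict Int Int :=
    grid.foldl (fun d row => row.foldl (fun d c => d.modify c 0 (· + 1)) d) PySem.Dict.empty
  match PySem.List.max? cnt.items (fun kv => kv.2) with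
  | none => []      -- Python raises ValueError (max of empty) here; outside Pre_
  | some bgkv =>
    let background := bgkv.1
    match cnt.keys.filter (fun c => c ≠ background) with
    | [o0, o1] =>
      let io : Int × Int := if cnt.getD o0 0 < cnt.getD o1 0 then (o0, o1) else (o1, o0)
      let inner := io.1
      let outer := io.2
      let mask := grid.map (fun row => row.map (fun cell => cell == outer))
      let out0 := grid.map (fun row => row)
      (PySem.List.pyRange 0 h 1).foldl (fun out i =>
        (PySem.List.pyRange 0 w 1).foldl (fun out j =>
          if PySem.List.pyGetD (PySem.List.pyGetD grid i []) j 0 ≠ background then out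
          else
            let diagonal := pvDiagOff.foldl (fun b off =>
              if b then true
              else pvInside h w (i + off.1) (j + off.2) &&
                   PySem.List.pyGetD (PySem.List.pyGetD mask (i + off.1) []) (j + off.2) false) false
            if !diagonal then out
            else
              let orthogonal := pvOrthoOff.foldl (fun b off =>
                if b then true
                else pvInside h w (i + off.1) (j + off.2) &&
                     PySem.List.pyGetD (PySem.List.pyGetD mask (i + off.1) []) (j + off.2) false) false
              if !orthogonal then
                PySem.List.pySetD out i (PySem.List.pySetD (PySem.List.pyGetD out i []) j inner)
              else out) out) out0
    | _ => grid.map (fun row => row)      -- len(other) != 2: return a copy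

-- ===== PORT B =====
-- every outer cell pushes its background diagonal / orthogonal neighbours into a set
def pvPush (grid : List (List Int)) (h w background : Int)
    (offs : List (Int × Int)) (i j : Int) (s : PySem.Set (Int × Int)) : PySem.Set (Int × Int) :=
  offs.foldl (fun s off =>
    let r := i + off.1
    let c := j + off.2
    if decide (0 ≤ r ∧ r < h) && decide (0 ≤ c ∧ c < w) &&
       (PySem.List.pyGetD (PySem.List.pyGetD grid r []) c 0 == background)
    then PySem.Set.add s (r, c) else s) s

def transform_alt (grid : List (List Int)) : List (List Int) :=
  let h : Int := grid.length
  let w : Int := if h ≠ 0 then ((grid.headD []).length : Int) else 0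
  let cnt : PySem.Dict Int Int := PySem.Dict.counter (grid.flatMap (fun row => row))
  -- max(...) on an empty counter: Python raises ValueError here; outside Pre_
  (PySem.List.max? cnt.items (fun kv => kv.2)).elim [] (fun bgkv =>
    let background := bgkv.1
    let other := cnt.keys.filter (fun c => c ≠ background)
    if other.length ≠ 2 then grid.map (fun row => row)
    else
      let io : Int × Int :=
        if cnt.getD (PySem.List.pyGetD other 0 0) 0 < cnt.getD (PySem.List.pyGetD other 1 0) 0
        then (PySem.List.pyGetD other 0 0, PySem.List.pyGetD other 1 0)
        else (PySem.List.pyGetD other 1 0, PySem.List.pyGetD other 0 0)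
      let inner := io.1
      let outer := io.2
      let sets :=
        (PySem.List.pyRange 0 h 1).foldl (fun st i =>
          (PySem.List.pyRange 0 w 1).foldl (fun st j =>
            if PySem.List.pyGetD (PySem.List.pyGetD grid i []) j 0 ≠ outer then st
            else (pvPush grid h w background pvDiagOff i j st.1,
                  pvPush grid h w background pvOrthoOff i j st.2)) st)
          (PySem.Set.empty, PySem.Set.empty)
      -- iteration order over the Python set is irrelevant: independent single-cell writes
      (PySem.Set.diff sets.1 sets.2).foldl (fun out rc =>
        PySem.List.pySetD out rc.1 (PySem.List.pySetD (PySem.List.pyGetD out rc.1 []) rc.2 inner))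
        (grid.map (fun row => row)))

-- ===== PRECONDITION & SPEC =====
-- Pre_ excludes exactly the inputs where Python A raises: grids with no cell at all (ValueError on
-- max of an empty Counter) and grids with exactly 3 distinct values in which some row is shorter
-- than the first row (IndexError while scanning row i at a column past its end).
def Pre_transform (grid : List (List Int)) : Prop :=
  (∃ row ∈ grid, row ≠ []) ∧
  ((PySem.List.dedup (grid.flatMap (fun row => row))).length = 3 →
    ∀ row ∈ grid, (grid.headD []).length ≤ row.length)
instance (grid : List (List Int)) : Decidable (Pre_transform grid) := by
  unfold Pre_transform; infer_instance

def pvWitness_transform : List (List Int) := [[0, 0], [1, 2]]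

def Spec_transform (grid : List (List Int)) (out : List (List Int)) : Prop := out = transform_alt grid
instance (grid : List (List Int)) (out : List (List Int)) : Decidable (Spec_transform grid out) := by unfold Spec_transform; infer_instance

-- ===== CLAIM (what is proved, stated in full; the proofs are below) =====
def Claim_equal_transform : Prop := ∀ (grid : List (List Int)), Dom_transform grid → Pre_transform grid → Spec_transform grid (transform grid)

-- ===== LEMMAS AND PROOFS =====

theorem pvGetD_set {α : Type} (l : List α) (i j : Nat) (a d : α) :
    (l.set i a).getD j d = if i = j ∧ i < l.length then a else l.getD j d := by
  by_cases hj : j < l.length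
  · rw [List.getD_eq_getElem _ _ (by simpa using hj), List.getElem_set,
      List.getD_eq_getElem _ _ hj]
    by_cases hij : i = j <;> simp [hij] <;> omega
  · rw [List.getD_eq_default _ _ (by simpa using hj), List.getD_eq_default _ _ (by omega),
      if_neg (by omega)]

def pvCell (g : List (List Int)) (r c : Int) : Int :=
  PySem.List.pyGetD (PySem.List.pyGetD g r []) c 0

def pvW2 (out : List (List Int)) (i j v : Int) : List (List Int) :=
  PySem.List.pySetD out i (PySem.List.pySetD (PySem.List.pyGetD out i []) j v)

def pvShape (g out : List (List Int)) : Prop :=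
  out.length = g.length ∧
  ∀ r : Nat, (out.getD r []).length = (g.getD r []).length

theorem pvShape_refl (g : List (List Int)) : pvShape g g := ⟨rfl, fun _ => rfl⟩

theorem pvShape_pvW2 (g out : List (List Int)) (i j v : Int) (hi : 0 ≤ i)
    (h : pvShape g out) : pvShape g (pvW2 out i j v) := by
  obtain ⟨h1, h2⟩ := h
  unfold pvW2
  rw [PySem.List.pySetD_of_nonneg _ _ hi]
  refine ⟨by simpa using h1, fun r => ?_⟩
  rw [pvGetD_set]
  split_ifs with hif
  · rw [PySem.List.pyGetD_of_nonneg _ _ hi, PySem.List.length_pySetD, ← hif.1]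
    exact h2 i.toNat
  · exact h2 r

theorem pvCell_pvW2 (out : List (List Int)) (i j v : Int) (hi : 0 ≤ i) (hj : 0 ≤ j)
    (r c : Int) (hr : 0 ≤ r) (hc : 0 ≤ c) :
    pvCell (pvW2 out i j v) r c =
      if r = i ∧ c = j ∧ i < (out.length : Int) ∧ j < ((PySem.List.pyGetD out i []).length : Int)
      then v else pvCell out r c := by
  unfold pvW2 pvCell
  rw [PySem.List.pySetD_of_nonneg _ _ hi, PySem.List.pySetD_of_nonneg _ _ hj,
    PySem.List.pyGetD_of_nonneg _ _ hi, PySem.List.pyGetD_of_nonneg _ _ hr,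
    PySem.List.pyGetD_of_nonneg _ _ hr, pvGetD_set]
  split_ifs with h1 h2 h2
  · -- row i replaced, full condition must hold modulo c = j
    rw [PySem.List.pyGetD_of_nonneg _ _ hc, pvGetD_set, if_pos ⟨by omega, by omega⟩]
  · -- row i replaced but target cell not written
    rw [PySem.List.pyGetD_of_nonneg _ _ hc, PySem.List.pyGetD_of_nonneg _ _ hc, pvGetD_set,
      ← h1.1]
    rw [if_neg (by omega)]
  · -- row not replaced but condition claims write: contradiction
    exfalso; omega
  · rfl

def pvInR (g : List (List Int)) (p : Int × Int) : Prop :=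
  0 ≤ p.1 ∧ p.1 < (g.length : Int) ∧ 0 ≤ p.2 ∧ p.2 < ((g.getD p.1.toNat []).length : Int)

theorem pvFoldW2_shape {ι : Type} (g : List (List Int)) (L : List ι)
    (pos : ι → Int × Int) (Q : ι → Bool) (v : Int)
    (hpos : ∀ x ∈ L, Q x = true → 0 ≤ (pos x).1) :
    ∀ out, pvShape g out →
      pvShape g (L.foldl (fun out x =>
        if Q x then pvW2 out (pos x).1 (pos x).2 v else out) out) := by
  induction L with
  | nil => intro out h; exact h
  | cons x L ih =>
    intro out h
    simp only [List.foldl_cons]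
    refine ih (fun y hy => hpos y (List.mem_cons_of_mem _ hy)) _ ?_
    by_cases hq : Q x = true
    · rw [if_pos hq]; exact pvShape_pvW2 g out _ _ v (hpos x (by simp) hq) h
    · rw [if_neg hq]; exact h

theorem pvFoldW2_cell {ι : Type} (g : List (List Int)) (L : List ι)
    (pos : ι → Int × Int) (Q : ι → Bool) (v : Int)
    (hin : ∀ x ∈ L, Q x = true → pvInR g (pos x)) :
    ∀ out, pvShape g out → ∀ r c : Int, 0 ≤ r → 0 ≤ c →
      pvCell (L.foldl (fun out x =>
          if Q x then pvW2 out (pos x).1 (pos x).2 v else out) out) r c =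
        if L.any (fun x => Q x && (pos x == (r, c))) then v else pvCell out r c := by
  induction L with
  | nil => intro out _ r c _ _; simp
  | cons x L ih =>
    intro out hsh r c hr hc
    simp only [List.foldl_cons, List.any_cons]
    have hrec := ih (fun y hy h => hin y (List.mem_cons_of_mem _ hy) h)
      (if Q x then pvW2 out (pos x).1 (pos x).2 v else out)
      (by
        by_cases hq : Q x = true
        · rw [if_pos hq]
          exact pvShape_pvW2 g out _ _ v (hin x (by simp) hq).1 hsh
        · rw [if_neg hq]; exact hsh) r c hr hc
    rw [hrec]
    by_cases hq : Q x = true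
    · have hinr := hin x (by simp) hq
      rw [if_pos hq]
      have hcell := pvCell_pvW2 out (pos x).1 (pos x).2 v hinr.1 hinr.2.2.1 r c hr hc
      by_cases hpc : pos x = (r, c)
      · -- the head writes exactly (r, c): both branches of the tail give v
        have hcond : r = (pos x).1 ∧ c = (pos x).2 ∧ (pos x).1 < (out.length : Int) ∧
            (pos x).2 < ((PySem.List.pyGetD out (pos x).1 []).length : Int) := by
          obtain ⟨h1, h2, h3, h4⟩ := hinr
          have hlen : out.length = g.length := hsh.1
          refine ⟨by rw [hpc], by rw [hpc], by omega, ?_⟩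
          rw [PySem.List.pyGetD_of_nonneg _ _ h1, hsh.2 (pos x).1.toNat]
          exact h4
        rw [hcell, if_pos hcond]
        simp [hq, hpc]
      · have : ¬(r = (pos x).1 ∧ c = (pos x).2 ∧ (pos x).1 < (out.length : Int) ∧
            (pos x).2 < ((PySem.List.pyGetD out (pos x).1 []).length : Int)) := by
          intro hcon
          have e1 := hcon.1
          have e2 := hcon.2.1
          exact hpc (Prod.ext (by omega) (by omega))
        rw [hcell, if_neg this]
        have : (pos x == (r, c)) = false := by
          simpa using hpc
        simp [this]
    · have hqf : Q x = false := by simpa using hq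
      rw [if_neg hq]
      simp [hqf]

theorem pvExt (g X Y : List (List Int)) (hX : pvShape g X) (hY : pvShape g Y)
    (h : ∀ r c : Nat, pvCell X ↑r ↑c = pvCell Y ↑r ↑c) : X = Y := by
  apply List.ext_getElem (by rw [hX.1, hY.1])
  intro r h1 h2
  apply List.ext_getElem
  · have hx := hX.2 r; have hy := hY.2 r
    rw [List.getD_eq_getElem _ _ h1] at hx
    rw [List.getD_eq_getElem _ _ h2] at hy
    omega
  · intro c hc1 hc2
    have := h r c
    unfold pvCell at this
    rw [PySem.List.pyGetD_natCast, PySem.List.pyGetD_natCast,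
      PySem.List.pyGetD_natCast, PySem.List.pyGetD_natCast,
      List.getD_eq_getElem _ _ h1, List.getD_eq_getElem _ _ h2,
      List.getD_eq_getElem _ _ hc1, List.getD_eq_getElem _ _ hc2] at this
    exact this

theorem pvFoldNested {α : Type} (l m : List Int) (F : α → Int × Int → α) :
    ∀ acc, l.foldl (fun acc i => m.foldl (fun acc j => F acc (i, j)) acc) acc
      = (l.flatMap (fun i => m.map (fun j => (i, j)))).foldl F acc := by
  induction l with
  | nil => intro acc; simp
  | cons x l ih =>
    intro acc
    simp only [List.foldl_cons, List.flatMap_cons, List.foldl_append, List.foldl_map]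
    exact ih _

theorem pvFoldBreak (l : List (Int × Int)) (p : Int × Int → Bool) :
    ∀ b, l.foldl (fun b x => if b then true else p x) b = (b || l.any p) := by
  induction l with
  | nil => intro b; simp
  | cons x l ih =>
    intro b
    simp only [List.foldl_cons, List.any_cons]
    rw [ih]
    by_cases hb : b <;> simp [hb]

theorem pvMemFold {ι α : Type} (l : List ι) (F : List α → ι → List α)
    (Q : ι → α → Prop) (hF : ∀ s x p, p ∈ F s x ↔ p ∈ s ∨ Q x p) :
    ∀ s p, (p ∈ l.foldl F s ↔ p ∈ s ∨ ∃ x ∈ l, Q x p) := by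
  induction l with
  | nil => intro s p; simp
  | cons x l ih =>
    intro s p
    simp only [List.foldl_cons]
    rw [ih (F s x) p, hF s x p]
    constructor
    · rintro ((h | h) | h)
      · exact Or.inl h
      · exact Or.inr ⟨x, by simp, h⟩
      · obtain ⟨y, hy, hq⟩ := h
        exact Or.inr ⟨y, List.mem_cons_of_mem _ hy, hq⟩
    · rintro (h | ⟨y, hy, hq⟩)
      · exact Or.inl (Or.inl h)
      · rcases List.mem_cons.mp hy with h | h
        · subst h; exact Or.inl (Or.inr hq)
        · exact Or.inr ⟨y, h, hq⟩


def pvMask (g : List (List Int)) (outer : Int) : List (List Bool) :=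
  g.map (fun row => row.map (fun cell => cell == outer))

-- the any-form of A's probe loop (mask version)
def pvAnyA (g : List (List Int)) (h w outer : Int) (offs : List (Int × Int)) (i j : Int) : Bool :=
  offs.any (fun off => pvInside h w (i + off.1) (j + off.2) &&
    PySem.List.pyGetD (PySem.List.pyGetD (pvMask g outer) (i + off.1) []) (j + off.2) false)

def pvQA (g : List (List Int)) (h w bgc outer : Int) (i j : Int) : Bool :=
  (pvCell g i j == bgc) && pvAnyA g h w outer pvDiagOff i j && !(pvAnyA g h w outer pvOrthoOff i j)

theorem pvABody (g : List (List Int)) (h w bgc inner outer i j : Int)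
    (out : List (List Int)) :
    (if PySem.List.pyGetD (PySem.List.pyGetD g i []) j 0 ≠ bgc then out
     else
       let diagonal := pvDiagOff.foldl (fun b off =>
         if b then true
         else pvInside h w (i + off.1) (j + off.2) &&
              PySem.List.pyGetD (PySem.List.pyGetD (g.map (fun row => row.map (fun cell => cell == outer))) (i + off.1) []) (j + off.2) false) false
       if !diagonal then out
       else
         let orthogonal := pvOrthoOff.foldl (fun b off =>
           if b then true
           else pvInside h w (i + off.1) (j + off.2) &&
                PySem.List.pyGetD (PySem.List.pyGetD (g.map (fun row => row.map (fun cell => cell == outer))) (i + off.1) []) (j + off.2) false) false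
         if !orthogonal then
           PySem.List.pySetD out i (PySem.List.pySetD (PySem.List.pyGetD out i []) j inner)
         else out)
    = if pvQA g h w bgc outer i j then pvW2 out i j inner else out := by
  rw [pvFoldBreak, pvFoldBreak]
  simp only [Bool.false_or]
  unfold pvQA pvAnyA pvMask pvCell pvW2
  by_cases h1 : PySem.List.pyGetD (PySem.List.pyGetD g i []) j 0 = bgc <;>
    by_cases h2 : pvDiagOff.any (fun off => pvInside h w (i + off.1) (j + off.2) &&
      PySem.List.pyGetD (PySem.List.pyGetD (g.map (fun row => row.map (fun cell => cell == outer))) (i + off.1) []) (j + off.2) false) <;>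
    by_cases h3 : pvOrthoOff.any (fun off => pvInside h w (i + off.1) (j + off.2) &&
      PySem.List.pyGetD (PySem.List.pyGetD (g.map (fun row => row.map (fun cell => cell == outer))) (i + off.1) []) (j + off.2) false) <;>
    simp [h1, h2, h3]

theorem pvFoldNestedW2 (l m : List Int) (Q : Int → Int → Bool) (v : Int)
    (acc : List (List Int)) :
    l.foldl (fun out i => m.foldl (fun out j => if Q i j then pvW2 out i j v else out) out) acc
      = (l.flatMap (fun i => m.map (fun j => (i, j)))).foldl
          (fun out p => if Q p.1 p.2 then pvW2 out p.1 p.2 v else out) acc :=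
  pvFoldNested l m (fun out p => if Q p.1 p.2 then pvW2 out p.1 p.2 v else out) acc

theorem pvPairsAny (h w : Int) (Q : Int × Int → Bool) (r c : Int) :
    (((PySem.List.pyRange 0 h 1).flatMap
        (fun i => (PySem.List.pyRange 0 w 1).map (fun j => (i, j)))).any
      (fun p => Q p && (p == (r, c))))
    = (decide (0 ≤ r ∧ r < h) && decide (0 ≤ c ∧ c < w) && Q (r, c)) := by
  rw [Bool.eq_iff_iff]
  simp only [List.any_eq_true, List.mem_flatMap, List.mem_map, Bool.and_eq_true,
    PySem.List.mem_pyRange_one, beq_iff_eq, decide_eq_true_eq]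
  constructor
  · rintro ⟨p, ⟨i, hi, j, hj, rfl⟩, hQ, heq⟩
    have h1 : i = r := congrArg Prod.fst heq
    have h2 : j = c := congrArg Prod.snd heq
    subst h1; subst h2
    exact ⟨⟨hi, hj⟩, hQ⟩
  · rintro ⟨⟨hr, hc⟩, hQ⟩
    exact ⟨(r, c), ⟨r, hr, c, hc, rfl⟩, hQ, rfl⟩

def pvCHK (g : List (List Int)) (h w bgc r c : Int) : Prop :=
  (0 ≤ r ∧ r < h) ∧ (0 ≤ c ∧ c < w) ∧ pvCell g r c = bgc

def pvPhi (g : List (List Int)) (h w bgc outer : Int) (offs : List (Int × Int))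
    (p : Int × Int) : Prop :=
  ∃ i, (0 ≤ i ∧ i < h) ∧ ∃ j, (0 ≤ j ∧ j < w) ∧ pvCell g i j = outer ∧
    ∃ off ∈ offs, pvCHK g h w bgc (i + off.1) (j + off.2) ∧ p = (i + off.1, j + off.2)

theorem pvMemPush (g : List (List Int)) (h w bgc : Int) (offs : List (Int × Int))
    (i j : Int) (s : PySem.Set (Int × Int)) (p : Int × Int) :
    p ∈ pvPush g h w bgc offs i j s ↔
      p ∈ s ∨ ∃ off ∈ offs, pvCHK g h w bgc (i + off.1) (j + off.2) ∧
        p = (i + off.1, j + off.2) := by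
  unfold pvPush
  rw [pvMemFold offs _ (fun off p => pvCHK g h w bgc (i + off.1) (j + off.2) ∧
      p = (i + off.1, j + off.2)) ?_ s p]
  intro s' off q
  simp only []
  by_cases hc : (decide (0 ≤ i + off.1 ∧ i + off.1 < h) &&
      decide (0 ≤ j + off.2 ∧ j + off.2 < w) &&
      (PySem.List.pyGetD (PySem.List.pyGetD g (i + off.1) []) (j + off.2) 0 == bgc)) = true
  · rw [if_pos hc, PySem.Set.mem_add]
    simp only [Bool.and_eq_true, decide_eq_true_eq, beq_iff_eq] at hc
    unfold pvCHK pvCell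
    constructor
    · rintro (hq | rfl)
      · exact Or.inl hq
      · exact Or.inr ⟨⟨hc.1.1, hc.1.2, hc.2⟩, rfl⟩
    · rintro (hq | ⟨_, rfl⟩)
      · exact Or.inl hq
      · exact Or.inr rfl
  · rw [if_neg hc]
    unfold pvCHK pvCell
    constructor
    · exact Or.inl
    · rintro (hq | ⟨⟨ha, hb, hd⟩, rfl⟩)
      · exact hq
      · exact absurd (by
          simp only [Bool.and_eq_true, decide_eq_true_eq, beq_iff_eq]
          exact ⟨⟨ha, hb⟩, hd⟩) hc

theorem pvFoldPairSplit {α β ι : Type} (l : List ι) (F : α × β → ι → α × β)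
    (f : α → ι → α) (g : β → ι → β)
    (hF : ∀ st x, F st x = (f st.1 x, g st.2 x)) :
    ∀ st : α × β, l.foldl F st = (l.foldl f st.1, l.foldl g st.2) := by
  induction l with
  | nil => intro st; simp
  | cons x l ih =>
    intro st
    simp only [List.foldl_cons]
    rw [hF st x, ih]

-- membership in the i-j double fold that conditionally pushes neighbours
theorem pvMemSets (g : List (List Int)) (h w bgc outer : Int) (offs : List (Int × Int))
    (p : Int × Int) :
    p ∈ (PySem.List.pyRange 0 h 1).foldl (fun s i =>
          (PySem.List.pyRange 0 w 1).foldl (fun s j =>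
            if PySem.List.pyGetD (PySem.List.pyGetD g i []) j 0 ≠ outer then s
            else pvPush g h w bgc offs i j s) s) PySem.Set.empty
      ↔ pvPhi g h w bgc outer offs p := by
  have hFj : ∀ (s' : List (Int × Int)) (i j : Int) (q' : Int × Int),
      q' ∈ (if PySem.List.pyGetD (PySem.List.pyGetD g i []) j 0 ≠ outer then s'
            else pvPush g h w bgc offs i j s') ↔
        q' ∈ s' ∨ (pvCell g i j = outer ∧
          ∃ off ∈ offs, pvCHK g h w bgc (i + off.1) (j + off.2) ∧
            q' = (i + off.1, j + off.2)) := by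
    intro s' i j q'
    by_cases hg : PySem.List.pyGetD (PySem.List.pyGetD g i []) j 0 = outer
    · rw [if_neg (by simpa using hg), pvMemPush]
      unfold pvCell
      tauto
    · rw [if_pos (by simpa using hg)]
      unfold pvCell
      tauto
  have hFi : ∀ (s : List (Int × Int)) (i : Int) (q : Int × Int),
      q ∈ (PySem.List.pyRange 0 w 1).foldl (fun s j =>
            if PySem.List.pyGetD (PySem.List.pyGetD g i []) j 0 ≠ outer then s
            else pvPush g h w bgc offs i j s) s ↔
        q ∈ s ∨ ∃ j, (0 ≤ j ∧ j < w) ∧ pvCell g i j = outer ∧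
          ∃ off ∈ offs, pvCHK g h w bgc (i + off.1) (j + off.2) ∧
            q = (i + off.1, j + off.2) := by
    intro s i q
    rw [pvMemFold _ _ (fun j p => pvCell g i j = outer ∧
        ∃ off ∈ offs, pvCHK g h w bgc (i + off.1) (j + off.2) ∧ p = (i + off.1, j + off.2))
        (hFj · i) s q]
    simp only [PySem.List.mem_pyRange_one]
  rw [pvMemFold _ _ (fun i p => ∃ j, (0 ≤ j ∧ j < w) ∧ pvCell g i j = outer ∧
      ∃ off ∈ offs, pvCHK g h w bgc (i + off.1) (j + off.2) ∧ p = (i + off.1, j + off.2))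
      hFi PySem.Set.empty p]
  unfold pvPhi
  simp only [PySem.Set.empty, List.not_mem_nil, false_or, PySem.List.mem_pyRange_one]

theorem pvAnyA_eq (g : List (List Int)) (h w outer : Int) (offs : List (Int × Int))
    (i j : Int) (hh : h = (g.length : Int))
    (hw : ∀ r : Nat, r < g.length → w ≤ ((g.getD r []).length : Int)) :
    pvAnyA g h w outer offs i j
      = offs.any (fun off => pvInside h w (i + off.1) (j + off.2) &&
          (pvCell g (i + off.1) (j + off.2) == outer)) := by
  unfold pvAnyA
  congr 1
  funext off
  by_cases hin : pvInside h w (i + off.1) (j + off.2) = true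
  · rw [hin, Bool.true_and, Bool.true_and]
    unfold pvInside at hin
    simp only [Bool.and_eq_true, decide_eq_true_eq] at hin
    obtain ⟨⟨hr0, hrh⟩, hc0, hcw⟩ := hin
    have hrlen : (i + off.1).toNat < g.length := by omega
    have hclen : (j + off.2).toNat < (g.getD (i + off.1).toNat []).length := by
      have := hw (i + off.1).toNat hrlen
      omega
    rw [List.getD_eq_getElem _ _ hrlen] at hclen
    unfold pvMask pvCell
    rw [PySem.List.pyGetD_eq_getElem _ _ hr0 (by
        rw [List.length_map]; omega),
      List.getElem_map,
      PySem.List.pyGetD_eq_getElem _ _ hr0 (by omega),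
      PySem.List.pyGetD_eq_getElem _ _ hc0 (by
        rw [List.length_map]; omega),
      List.getElem_map,
      PySem.List.pyGetD_eq_getElem _ _ hc0 (by omega)]
  · have hin' : pvInside h w (i + off.1) (j + off.2) = false := by
      simpa using hin
    rw [hin', Bool.false_and, Bool.false_and]

theorem pvFoldW2T_shape (g : List (List Int)) (L : List (Int × Int)) (v : Int)
    (hpos : ∀ p ∈ L, 0 ≤ p.1) (out : List (List Int)) (h : pvShape g out) :
    pvShape g (L.foldl (fun out p => pvW2 out p.1 p.2 v) out) := by
  have heq : (fun (out : List (List Int)) (p : Int × Int) => pvW2 out p.1 p.2 v)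
      = (fun out p => if (fun (_ : Int × Int) => true) p then
          pvW2 out ((fun (q : Int × Int) => q) p).1 ((fun (q : Int × Int) => q) p).2 v
        else out) := by
    funext out p
    simp
  rw [heq]
  exact pvFoldW2_shape g L (fun q => q) (fun _ => true) v (fun x hx _ => hpos x hx) out h

theorem pvFoldW2T_cell (g : List (List Int)) (L : List (Int × Int)) (v : Int)
    (hin : ∀ p ∈ L, pvInR g p) (out : List (List Int)) (h : pvShape g out)
    (r c : Int) (hr : 0 ≤ r) (hc : 0 ≤ c) :
    pvCell (L.foldl (fun out p => pvW2 out p.1 p.2 v) out) r c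
      = if L.any (fun p => p == (r, c)) then v else pvCell out r c := by
  have heq : (fun (out : List (List Int)) (p : Int × Int) => pvW2 out p.1 p.2 v)
      = (fun out p => if (fun (_ : Int × Int) => true) p then
          pvW2 out ((fun (q : Int × Int) => q) p).1 ((fun (q : Int × Int) => q) p).2 v
        else out) := by
    funext out p
    simp
  rw [heq, pvFoldW2_cell g L (fun q => q) (fun _ => true) v (fun x hx _ => hin x hx) out h r c hr hc]
  simp

theorem pvPhi_chk (g : List (List Int)) (h w bgc outer : Int) (offs : List (Int × Int))
    (r c : Int) (hphi : pvPhi g h w bgc outer offs (r, c)) : pvCHK g h w bgc r c := by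
  obtain ⟨i, _, j, _, _, off, _, hchk, heq⟩ := hphi
  have h1 : r = i + off.1 := congrArg Prod.fst heq
  have h2 : c = j + off.2 := congrArg Prod.snd heq
  rw [h1, h2]
  exact hchk

theorem pvPhi_iff_any (g : List (List Int)) (h w bgc outer : Int) (offs : List (Int × Int))
    (hsym : ∀ off ∈ offs, (-off.1, -off.2) ∈ offs)
    (r c : Int) (hchk : pvCHK g h w bgc r c) :
    pvPhi g h w bgc outer offs (r, c) ↔
      ∃ off ∈ offs, (0 ≤ r + off.1 ∧ r + off.1 < h) ∧ (0 ≤ c + off.2 ∧ c + off.2 < w) ∧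
        pvCell g (r + off.1) (c + off.2) = outer := by
  constructor
  · rintro ⟨i, hi, j, hj, houter, off, hoff, hchk', heq⟩
    have h1 : r = i + off.1 := congrArg Prod.fst heq
    have h2 : c = j + off.2 := congrArg Prod.snd heq
    refine ⟨(-off.1, -off.2), hsym off hoff, ?_, ?_, ?_⟩
    · simp only []
      omega
    · simp only []
      omega
    · have hr' : r + (-off.1, -off.2).1 = i := by simp only []; omega
      have hc' : c + (-off.1, -off.2).2 = j := by simp only []; omega
      rw [hr', hc', houter]
  · rintro ⟨off, hoff, hb1, hb2, hcell⟩
    refine ⟨r + off.1, hb1, c + off.2, hb2, hcell,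
      (-off.1, -off.2), hsym off hoff, ?_, ?_⟩
    · have hr' : r + off.1 + (-off.1, -off.2).1 = r := by simp only []; omega
      have hc' : c + off.2 + (-off.1, -off.2).2 = c := by simp only []; omega
      rw [hr', hc']
      exact hchk
    · have hr' : r + off.1 + (-off.1, -off.2).1 = r := by simp only []; omega
      have hc' : c + off.2 + (-off.1, -off.2).2 = c := by simp only []; omega
      rw [hr', hc']

theorem pvSymDiag : ∀ off ∈ pvDiagOff, (-off.1, -off.2) ∈ pvDiagOff := by decide
theorem pvSymOrtho : ∀ off ∈ pvOrthoOff, (-off.1, -off.2) ∈ pvOrthoOff := by decide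

theorem pvCondEquiv (g : List (List Int)) (h w bgc outer : Int)
    (hh : h = (g.length : Int))
    (hw : ∀ r : Nat, r < g.length → w ≤ ((g.getD r []).length : Int))
    (r c : Int) :
    ((0 ≤ r ∧ r < h) ∧ (0 ≤ c ∧ c < w) ∧ pvQA g h w bgc outer r c = true)
      ↔ (pvPhi g h w bgc outer pvDiagOff (r, c) ∧
         ¬ pvPhi g h w bgc outer pvOrthoOff (r, c)) := by
  have hany : ∀ offs : List (Int × Int), (offs.any (fun off => pvInside h w (r + off.1) (c + off.2) &&
      (pvCell g (r + off.1) (c + off.2) == outer)) = true) ↔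
      ∃ off ∈ offs, (0 ≤ r + off.1 ∧ r + off.1 < h) ∧ (0 ≤ c + off.2 ∧ c + off.2 < w) ∧
        pvCell g (r + off.1) (c + off.2) = outer := by
    intro offs
    simp only [List.any_eq_true, Bool.and_eq_true, beq_iff_eq]
    unfold pvInside
    simp only [Bool.and_eq_true, decide_eq_true_eq]
    tauto
  constructor
  · rintro ⟨hbr, hbc, hqa⟩
    unfold pvQA at hqa
    rw [pvAnyA_eq g h w outer _ r c hh hw, pvAnyA_eq g h w outer _ r c hh hw] at hqa
    simp only [Bool.and_eq_true, Bool.not_eq_true', beq_iff_eq] at hqa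
    obtain ⟨⟨hbg, hanyD⟩, hanyO⟩ := hqa
    have hchk : pvCHK g h w bgc r c := ⟨hbr, hbc, hbg⟩
    constructor
    · exact (pvPhi_iff_any g h w bgc outer pvDiagOff pvSymDiag r c hchk).mpr
        ((hany pvDiagOff).mp hanyD)
    · intro hphi
      have := (hany pvOrthoOff).mpr
        ((pvPhi_iff_any g h w bgc outer pvOrthoOff pvSymOrtho r c hchk).mp hphi)
      rw [hanyO] at this
      exact Bool.false_ne_true this
  · rintro ⟨hphiD, hno⟩
    have hchk := pvPhi_chk g h w bgc outer pvDiagOff r c hphiD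
    obtain ⟨hbr, hbc, hbg⟩ := hchk
    refine ⟨hbr, hbc, ?_⟩
    unfold pvQA
    rw [pvAnyA_eq g h w outer _ r c hh hw, pvAnyA_eq g h w outer _ r c hh hw]
    simp only [Bool.and_eq_true, Bool.not_eq_true', beq_iff_eq]
    refine ⟨⟨hbg, (hany pvDiagOff).mpr ?_⟩, ?_⟩
    · exact (pvPhi_iff_any g h w bgc outer pvDiagOff pvSymDiag r c ⟨hbr, hbc, hbg⟩).mp hphiD
    · by_contra hne
      have : pvOrthoOff.any (fun off => pvInside h w (r + off.1) (c + off.2) &&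
          (pvCell g (r + off.1) (c + off.2) == outer)) = true := by
        cases hb : pvOrthoOff.any (fun off => pvInside h w (r + off.1) (c + off.2) &&
            (pvCell g (r + off.1) (c + off.2) == outer))
        · exact absurd hb hne
        · rfl
      exact hno ((pvPhi_iff_any g h w bgc outer pvOrthoOff pvSymOrtho r c ⟨hbr, hbc, hbg⟩).mpr
        ((hany pvOrthoOff).mp this))

theorem pvMainArm (g : List (List Int)) (h w bgc inner outer : Int)
    (hh : h = (g.length : Int)) (hwdef : w = ((g.headD []).length : Int))
    (hrows : ∀ row ∈ g, (g.headD []).length ≤ row.length) :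
    ((PySem.List.pyRange 0 h 1).foldl (fun out i =>
      (PySem.List.pyRange 0 w 1).foldl (fun out j =>
        if PySem.List.pyGetD (PySem.List.pyGetD g i []) j 0 ≠ bgc then out
        else
          let diagonal := pvDiagOff.foldl (fun b off =>
            if b then true
            else pvInside h w (i + off.1) (j + off.2) &&
                 PySem.List.pyGetD (PySem.List.pyGetD
                   (g.map (fun row => row.map (fun cell => cell == outer)))
                   (i + off.1) []) (j + off.2) false) false
          if !diagonal then out
          else
            let orthogonal := pvOrthoOff.foldl (fun b off =>
              if b then true
              else pvInside h w (i + off.1) (j + off.2) &&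
                   PySem.List.pyGetD (PySem.List.pyGetD
                     (g.map (fun row => row.map (fun cell => cell == outer)))
                     (i + off.1) []) (j + off.2) false) false
            if !orthogonal then
              PySem.List.pySetD out i (PySem.List.pySetD (PySem.List.pyGetD out i []) j inner)
            else out) out) (g.map (fun row => row)))
    = ((PySem.Set.diff
        ((PySem.List.pyRange 0 h 1).foldl (fun st i =>
          (PySem.List.pyRange 0 w 1).foldl (fun st j =>
            if PySem.List.pyGetD (PySem.List.pyGetD g i []) j 0 ≠ outer then st
            else (pvPush g h w bgc pvDiagOff i j st.1,
                  pvPush g h w bgc pvOrthoOff i j st.2)) st)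
          (PySem.Set.empty, PySem.Set.empty)).1
        ((PySem.List.pyRange 0 h 1).foldl (fun st i =>
          (PySem.List.pyRange 0 w 1).foldl (fun st j =>
            if PySem.List.pyGetD (PySem.List.pyGetD g i []) j 0 ≠ outer then st
            else (pvPush g h w bgc pvDiagOff i j st.1,
                  pvPush g h w bgc pvOrthoOff i j st.2)) st)
          (PySem.Set.empty, PySem.Set.empty)).2).foldl
        (fun out rc =>
          PySem.List.pySetD out rc.1 (PySem.List.pySetD (PySem.List.pyGetD out rc.1 []) rc.2 inner))
        (g.map (fun row => row))) := by
  have hw' : ∀ r : Nat, r < g.length → w ≤ ((g.getD r []).length : Int) := by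
    intro r hr
    rw [hwdef, List.getD_eq_getElem _ _ hr]
    exact_mod_cast hrows _ (List.getElem_mem hr)
  -- B: split the pair fold into its two components
  have hsplitIn : ∀ (i : Int) (st : PySem.Set (Int × Int) × PySem.Set (Int × Int)),
      (PySem.List.pyRange 0 w 1).foldl (fun st j =>
        if PySem.List.pyGetD (PySem.List.pyGetD g i []) j 0 ≠ outer then st
        else (pvPush g h w bgc pvDiagOff i j st.1,
              pvPush g h w bgc pvOrthoOff i j st.2)) st
      = ((PySem.List.pyRange 0 w 1).foldl (fun s j =>
          if PySem.List.pyGetD (PySem.List.pyGetD g i []) j 0 ≠ outer then s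
          else pvPush g h w bgc pvDiagOff i j s) st.1,
         (PySem.List.pyRange 0 w 1).foldl (fun s j =>
          if PySem.List.pyGetD (PySem.List.pyGetD g i []) j 0 ≠ outer then s
          else pvPush g h w bgc pvOrthoOff i j s) st.2) := by
    intro i st
    apply pvFoldPairSplit
    intro st' j
    by_cases hg : PySem.List.pyGetD (PySem.List.pyGetD g i []) j 0 = outer
    · rw [if_neg (by simpa using hg), if_neg (by simpa using hg), if_neg (by simpa using hg)]
    · rw [if_pos (by simpa using hg), if_pos (by simpa using hg), if_pos (by simpa using hg)]
  have hsplitOut :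
      (PySem.List.pyRange 0 h 1).foldl (fun st i =>
        (PySem.List.pyRange 0 w 1).foldl (fun st j =>
          if PySem.List.pyGetD (PySem.List.pyGetD g i []) j 0 ≠ outer then st
          else (pvPush g h w bgc pvDiagOff i j st.1,
                pvPush g h w bgc pvOrthoOff i j st.2)) st)
        (PySem.Set.empty, PySem.Set.empty)
      = ((PySem.List.pyRange 0 h 1).foldl (fun s i =>
          (PySem.List.pyRange 0 w 1).foldl (fun s j =>
            if PySem.List.pyGetD (PySem.List.pyGetD g i []) j 0 ≠ outer then s
            else pvPush g h w bgc pvDiagOff i j s) s) PySem.Set.empty,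
         (PySem.List.pyRange 0 h 1).foldl (fun s i =>
          (PySem.List.pyRange 0 w 1).foldl (fun s j =>
            if PySem.List.pyGetD (PySem.List.pyGetD g i []) j 0 ≠ outer then s
            else pvPush g h w bgc pvOrthoOff i j s) s) PySem.Set.empty) := by
    apply pvFoldPairSplit
    intro st i
    exact hsplitIn i st
  rw [hsplitOut]
  simp only [List.map_id']
  -- the two set components and the recolor list
  set DS := (PySem.List.pyRange 0 h 1).foldl (fun s i =>
      (PySem.List.pyRange 0 w 1).foldl (fun s j =>
        if PySem.List.pyGetD (PySem.List.pyGetD g i []) j 0 ≠ outer then s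
        else pvPush g h w bgc pvDiagOff i j s) s) PySem.Set.empty with hDS
  set OS := (PySem.List.pyRange 0 h 1).foldl (fun s i =>
      (PySem.List.pyRange 0 w 1).foldl (fun s j =>
        if PySem.List.pyGetD (PySem.List.pyGetD g i []) j 0 ≠ outer then s
        else pvPush g h w bgc pvOrthoOff i j s) s) PySem.Set.empty with hOS
  have hmemD : ∀ p, p ∈ DS ↔ pvPhi g h w bgc outer pvDiagOff p := by
    intro p; rw [hDS]; exact pvMemSets g h w bgc outer pvDiagOff p
  have hmemO : ∀ p, p ∈ OS ↔ pvPhi g h w bgc outer pvOrthoOff p := by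
    intro p; rw [hOS]; exact pvMemSets g h w bgc outer pvOrthoOff p
  have hmemDiff : ∀ p, p ∈ PySem.Set.diff DS OS ↔
      (pvPhi g h w bgc outer pvDiagOff p ∧ ¬ pvPhi g h w bgc outer pvOrthoOff p) := by
    intro p
    rw [PySem.Set.mem_diff, hmemD, hmemO]
  have hdiffInR : ∀ p ∈ PySem.Set.diff DS OS, pvInR g p := by
    intro p hp
    have hchk := pvPhi_chk g h w bgc outer pvDiagOff p.1 p.2
      (by rw [← Prod.mk.eta (p := p)] at hp; exact ((hmemDiff _).mp hp).1)
    obtain ⟨⟨h1, h2⟩, ⟨h3, h4⟩, _⟩ := hchk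
    refine ⟨h1, by omega, h3, ?_⟩
    have := hw' p.1.toNat (by omega)
    omega
  -- A: rewrite the body and flatten the double loop
  simp only [pvABody]
  rw [pvFoldNestedW2]
  -- pointwise comparison
  apply pvExt g
  · exact pvFoldW2_shape g _ (fun p => p) (fun p => pvQA g h w bgc outer p.1 p.2) inner
      (fun x hx hq => by
        rcases List.mem_flatMap.mp hx with ⟨i, hi, hx'⟩
        rcases List.mem_map.mp hx' with ⟨j, hj, rfl⟩
        exact (PySem.List.mem_pyRange_one.mp hi).1) g (pvShape_refl g)
  · exact pvFoldW2T_shape g _ inner (fun p hp => (hdiffInR p hp).1) g (pvShape_refl g)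
  · intro r c
    have hinA : ∀ p ∈ (PySem.List.pyRange 0 h 1).flatMap
        (fun i => (PySem.List.pyRange 0 w 1).map (fun j => (i, j))),
        (fun p => pvQA g h w bgc outer p.1 p.2) p = true → pvInR g p := by
      intro p hp hq
      rcases List.mem_flatMap.mp hp with ⟨i, hi, hp'⟩
      rcases List.mem_map.mp hp' with ⟨j, hj, rfl⟩
      obtain ⟨hi1, hi2⟩ := PySem.List.mem_pyRange_one.mp hi
      obtain ⟨hj1, hj2⟩ := PySem.List.mem_pyRange_one.mp hj
      refine ⟨hi1, by omega, hj1, ?_⟩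
      have := hw' i.toNat (by omega)
      show j < ((g.getD i.toNat []).length : Int)
      omega
    have hbodyB : (fun (out : List (List Int)) (rc : Int × Int) =>
        PySem.List.pySetD out rc.1 (PySem.List.pySetD (PySem.List.pyGetD out rc.1 []) rc.2 inner))
        = (fun (out : List (List Int)) (rc : Int × Int) => pvW2 out rc.1 rc.2 inner) := rfl
    rw [hbodyB]
    rw [pvFoldW2_cell g _ (fun p => p) (fun p => pvQA g h w bgc outer p.1 p.2) inner hinA
        g (pvShape_refl g) ↑r ↑c (by positivity) (by positivity),
      pvFoldW2T_cell g _ inner hdiffInR g (pvShape_refl g) ↑r ↑c (by positivity) (by positivity),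
      pvPairsAny h w (fun p => pvQA g h w bgc outer p.1 p.2) ↑r ↑c]
    have hcond : (decide (0 ≤ (r : Int) ∧ (r : Int) < h) &&
        decide (0 ≤ (c : Int) ∧ (c : Int) < w) &&
        pvQA g h w bgc outer (((r : Int), (c : Int)) : Int × Int).1
          (((r : Int), (c : Int)) : Int × Int).2)
        = ((PySem.Set.diff DS OS).any fun p => p == ((r : Int), (c : Int))) := by
      apply Bool.eq_iff_iff.mpr
      constructor
      · intro hA
        simp only [Bool.and_eq_true, decide_eq_true_eq] at hA
        obtain ⟨⟨hbr, hbc⟩, hq⟩ := hA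
        have hmem := (hmemDiff ((r : Int), (c : Int))).mpr
          ((pvCondEquiv g h w bgc outer hh hw' ↑r ↑c).mp ⟨hbr, hbc, hq⟩)
        exact List.any_eq_true.mpr ⟨((r : Int), (c : Int)), hmem, by simp⟩
      · intro hB
        obtain ⟨p, hp, hpeq⟩ := List.any_eq_true.mp hB
        have hpe : p = ((r : Int), (c : Int)) := by simpa using hpeq
        subst hpe
        have := (pvCondEquiv g h w bgc outer hh hw' ↑r ↑c).mpr ((hmemDiff _).mp hp)
        simp only [Bool.and_eq_true, decide_eq_true_eq]
        exact ⟨⟨this.1, this.2.1⟩, this.2.2⟩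
    rw [hcond]

theorem pvFilterNe3 (l : List Int) (b o0 o1 : Int) (hnd : l.Nodup) (hb : b ∈ l)
    (hfil : l.filter (fun c => c ≠ b) = [o0, o1]) : l.length = 3 := by
  have h1 : (l.filter (fun c => decide (c ≠ b))).length = 2 := by rw [hfil]; rfl
  have h2 : (l.filter (fun c => !(decide (c ≠ b)))).length = 1 := by
    have : (fun c => !(decide (c ≠ b))) = (fun c => c == b) := by
      funext c
      by_cases hc : c = b <;> simp [hc]
    rw [this]
    have := List.count_eq_one_of_mem hnd hb
    rw [← List.countP_eq_length_filter]
    simpa [List.count] using this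
  have := List.length_eq_length_filter_add (l := l) (fun c => decide (c ≠ b))
  omega

theorem pvEquiv (grid : List (List Int)) (hpre : Pre_transform grid) :
    transform grid = transform_alt grid := by
  have hcnt : grid.foldl (fun d row => row.foldl (fun d c => d.modify c 0 (· + 1)) d)
      (PySem.Dict.empty : PySem.Dict Int Int)
      = PySem.Dict.counter (grid.flatMap (fun row => row)) := by
    rw [PySem.Dict.counter_eq_foldl, List.flatMap_id', List.foldl_flatten]
  unfold transform transform_alt
  simp only [hcnt]
  rcases hmax : PySem.List.max? (PySem.Dict.counter (grid.flatMap (fun row => row))).items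
      (fun kv => kv.2) with _ | bgkv
  · simp only [Option.elim]
  · simp only [Option.elim]
    have hne : grid ≠ [] := by
      intro h0
      subst h0
      have hmax' : (none : Option (Int × Int)) = some bgkv := hmax
      simp at hmax'
    have hne' : ((grid.length : Int)) ≠ 0 := by
      cases grid with
      | nil => exact absurd rfl hne
      | cons a l =>
        intro h0
        rw [List.length_cons] at h0
        omega
    rcases hfil : (PySem.Dict.counter (grid.flatMap (fun row => row))).keys.filter
        (fun c => c ≠ bgkv.1) with _ | ⟨o0, t⟩
    · clear hfil
      rw [if_pos (show (([] : List Int).length ≠ 2) from by simp)]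
    · rcases t with _ | ⟨o1, t2⟩
      · clear hfil
        rw [if_pos (show (([o0] : List Int).length ≠ 2) from by simp)]
      · rcases t2 with _ | ⟨o2, t3⟩
        · rw [if_neg (show ¬(([o0, o1] : List Int).length ≠ 2) from by simp)]
          have hkeys := PySem.Dict.keys_counter (grid.flatMap (fun row => row))
          have hnd := PySem.Dict.nodup_keys_counter (grid.flatMap (fun row => row))
          have hbg : bgkv.1 ∈ (PySem.Dict.counter (grid.flatMap (fun row => row))).keys :=
            PySem.Dict.mem_keys_of_mem_items _ (PySem.List.max?_mem hmax)
          have hlen3 : (PySem.List.dedup (grid.flatMap (fun row => row))).length = 3 := by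
            rw [PySem.List.dedup_eq_ofList, ← hkeys]
            exact pvFilterNe3 _ bgkv.1 o0 o1 hnd hbg hfil
          have hrows := hpre.2 hlen3
          exact pvMainArm grid _ _ bgkv.1 _ _ rfl (if_pos hne') hrows
        · clear hfil
          rw [if_pos (show ((o0 :: o1 :: o2 :: t3 : List Int).length ≠ 2) from by simp)]

-- ===== VERDICT (by name: the statement is the Claim_ definition above) =====
theorem transform_spec : Claim_equal_transform := by
  intro grid _ hpre
  unfold Spec_transform
  exact pvEquiv grid hpre
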